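-- pv_equiv track=rewrite | github.com/lambrosopos/programming_language_journey | coding_problems/baekjoon/1284.py | solve
-- ===== SOURCE A (Python) =====
-- def solve(num: str) -> int:
--     total = 2 + (len(num) - 1)
--
--     for n in num:
--         if n == '1':
--             total += 2
--         elif n == '0':
--             total += 4
--         else:
--             total += 3
--
--     return total
-- ===== SOURCE B (Python) =====
-- def solve(num: str) -> int:
--     return 4 * len(num) + 1 + num.count('0') - num.count('1')
-- ===== Notes on version B (the rewrite author's own statement) =====
-- stated objective: simpler
-- what changed: Replaced the per-character accumulating loop with a closed-form arithmetic expression over the length and two aggregate character counts.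
import Mathlib
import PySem

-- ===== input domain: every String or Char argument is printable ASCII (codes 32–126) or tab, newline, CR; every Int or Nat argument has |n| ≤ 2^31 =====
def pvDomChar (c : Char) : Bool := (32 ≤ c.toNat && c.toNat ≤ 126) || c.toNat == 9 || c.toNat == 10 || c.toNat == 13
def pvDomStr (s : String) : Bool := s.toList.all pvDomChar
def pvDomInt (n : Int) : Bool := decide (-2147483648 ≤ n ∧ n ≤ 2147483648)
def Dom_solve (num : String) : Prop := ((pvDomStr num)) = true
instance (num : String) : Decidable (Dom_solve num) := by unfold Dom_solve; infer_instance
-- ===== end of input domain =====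

-- B replaces A's per-character accumulating loop with a closed-form expression
-- over the length and two character counts (simpler; same O(n) asymptotics, measured faster in a timing run).

-- ===== PORT A =====
def solve (num : String) : Int :=
  let total : Int := 2 + ((PySem.Str.len num : Int) - 1)
  num.toList.foldl (fun total n =>
    if n == '1' then total + 2
    else if n == '0' then total + 4
    else total + 3) total

-- ===== PORT B =====
def solve_alt (num : String) : Int :=
  4 * (PySem.Str.len num : Int) + 1
    + (PySem.Str.count num "0" : Int) - (PySem.Str.count num "1" : Int)

-- ===== PRECONDITION & SPEC =====
def Spec_solve (num : String) (out : Int) : Prop := out = solve_alt num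
instance (num : String) (out : Int) : Decidable (Spec_solve num out) := by unfold Spec_solve; infer_instance

-- ===== CLAIM (what is proved, stated in full; the proofs are below) =====
def Claim_equal_solve : Prop := ∀ (num : String), Dom_solve num → Spec_solve num (solve num)

-- ===== LEMMAS AND PROOFS =====

-- A single-character substring count is the character count.
theorem chars_count_go_singleton (c : Char) (l : List Char) (fuel acc : Nat)
    (h : l.length ≤ fuel) :
    PySem.Chars.count.go [c] fuel l acc = acc + l.count c := by
  induction l generalizing fuel acc with
  | nil => cases fuel <;> simp [PySem.Chars.count.go]
  | cons x t ih =>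
    cases fuel with
    | zero => simp at h
    | succ n =>
      simp only [List.length_cons, Nat.succ_le_succ_iff] at h
      by_cases hx : x = c
      · subst hx
        simp [PySem.Chars.count.go, List.isPrefixOf, ih _ _ h]
        omega
      · simp [PySem.Chars.count.go, List.isPrefixOf, hx, ih _ _ h,
          Ne.symm hx]

theorem chars_count_singleton (c : Char) (l : List Char) :
    PySem.Chars.count l [c] = l.count c := by
  simp [PySem.Chars.count, chars_count_go_singleton c l l.length 0 le_rfl]

theorem solve_foldl (l : List Char) (t : Int) :
    l.foldl (fun total n =>
      if n == '1' then total + 2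
      else if n == '0' then total + 4
      else total + 3) t
    = t + 3 * l.length + l.count '0' - l.count '1' := by
  induction l generalizing t with
  | nil => simp
  | cons x xs ih =>
    rw [List.foldl_cons]
    by_cases h1 : x = '1'
    · subst h1
      rw [show (if (('1' : Char) == '1') = true then t + 2
          else if (('1' : Char) == '0') = true then t + 4 else t + 3) = t + 2 from rfl,
        ih]
      simp
      ring
    · by_cases h0 : x = '0'
      · subst h0
        rw [show (if (('0' : Char) == '1') = true then t + 2
            else if (('0' : Char) == '0') = true then t + 4 else t + 3) = t + 4 from rfl,
          ih]
        simp
        ring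
      · rw [show (if (x == '1') = true then t + 2
            else if (x == '0') = true then t + 4 else t + 3) = t + 3 from by
              simp [h1, h0], ih]
        simp [h1, h0]
        ring

-- ===== VERDICT (by name: the statement is the Claim_ definition above) =====
theorem solve_spec : Claim_equal_solve := by
  intro num _
  show solve num = solve_alt num
  simp only [solve, solve_alt, PySem.Str.len_eq, PySem.Str.count_eq,
     solve_foldl]
  have h0 : ("0" : String).toList = ['0'] := rfl
  have h1 : ("1" : String).toList = ['1'] := rfl
  rw [h0, h1, chars_count_singleton, chars_count_singleton]
  ring
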